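-- pv_equiv track=rewrite | github.com/nntoan209/affinetes-local | environments/primeintellect/lgc/i3_logic/games/tasks/number_wall/scripts/number_wall_verifier.py | _check_diagonal_borders
-- ===== SOURCE A (Python) =====
-- from collections import deque
--
-- def _check_diagonal_borders(grid):
--     n = len(grid)
--
--     island_map = {}
--     island_id = 0
--     visited = set()
--
--     for i in range(n):
--         for j in range(n):
--             if grid[i][j] != "A" and (i, j) not in visited:
--                 queue = deque([(i, j)])
--                 visited.add((i, j))
--
--                 while queue:
--                     r, c = queue.popleft()
--                     island_map[(r, c)] = island_id
--
--                     for dr, dc in [(0, 1), (1, 0), (0, -1), (-1, 0)]: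
--                         nr, nc = r + dr, c + dc
--                         if 0 <= nr < n and 0 <= nc < n and grid[nr][nc] != "A" and (nr, nc) not in visited:
--                             queue.append((nr, nc))
--                             visited.add((nr, nc))
--
--                 island_id += 1
--
--     for i in range(n - 1):
--         for j in range(n - 1):
--             if grid[i][j] != "A" and grid[i + 1][j + 1] != "A" and grid[i][j + 1] == "A" and grid[i + 1][j] == "A":
--                 if island_map.get((i, j)) != island_map.get((i + 1, j + 1)):
--                     return False
--
--             if grid[i][j + 1] != "A" and grid[i + 1][j] != "A" and grid[i][j] == "A" and grid[i + 1][j + 1] == "A":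
--                 if island_map.get((i, j + 1)) != island_map.get((i + 1, j)):
--                     return False
--
--     return True
-- ===== SOURCE B (Python) =====
-- def _check_diagonal_borders(grid):
--     n = len(grid)
--     # Phase 1: label every non-"A" cell with its row-major index ( "A" cells get -1 ),
--     # then propagate the minimum label across orthogonal neighbours (synchronous
--     # Jacobi rounds) to a fixpoint: equal labels <=> same connected component.
--     lab = [[(i * n + j if grid[i][j] != "A" else -1) for j in range(n)] for i in range(n)]
--     changed = True
--     while changed:
--         changed = False
--         new = []
--         for i in range(n):
--             row = []
--             for j in range(n):
--                 m = lab[i][j]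
--                 if m != -1:
--                     for r, c in ((i, j + 1), (i + 1, j), (i, j - 1), (i - 1, j)):
--                         if 0 <= r < n and 0 <= c < n and lab[r][c] != -1 and lab[r][c] < m:
--                             m = lab[r][c]
--                     if m != lab[i][j]:
--                         changed = True
--                 row.append(m)
--             new.append(row)
--         lab = new
--
--     # Phase 2: the label array alone determines the answer (-1 marks an "A" cell):
--     # collect the violating diagonal crossings; valid iff there are none.
--     bad = [(i, j) for i in range(n - 1) for j in range(n - 1)
--            if (lab[i][j] != -1 and lab[i + 1][j + 1] != -1 and
--                lab[i][j + 1] == -1 and lab[i + 1][j] == -1 and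
--                lab[i][j] != lab[i + 1][j + 1])
--            or (lab[i][j + 1] != -1 and lab[i + 1][j] != -1 and
--                lab[i][j] == -1 and lab[i + 1][j + 1] == -1 and
--                lab[i][j + 1] != lab[i + 1][j])]
--     return not bad
-- ===== Notes on version B (the rewrite author's own statement) =====
-- stated objective: alternative
-- what changed: The BFS flood-fill with queue/visited-set is replaced by synchronous minimum-label propagation (Jacobi iteration to a fixpoint), and the diagonal scan with early returns is replaced by a comprehension that collects violating crossings from the label array alone (-1 marks 'A' cells), returning whether it is empty.
import Mathlib
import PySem

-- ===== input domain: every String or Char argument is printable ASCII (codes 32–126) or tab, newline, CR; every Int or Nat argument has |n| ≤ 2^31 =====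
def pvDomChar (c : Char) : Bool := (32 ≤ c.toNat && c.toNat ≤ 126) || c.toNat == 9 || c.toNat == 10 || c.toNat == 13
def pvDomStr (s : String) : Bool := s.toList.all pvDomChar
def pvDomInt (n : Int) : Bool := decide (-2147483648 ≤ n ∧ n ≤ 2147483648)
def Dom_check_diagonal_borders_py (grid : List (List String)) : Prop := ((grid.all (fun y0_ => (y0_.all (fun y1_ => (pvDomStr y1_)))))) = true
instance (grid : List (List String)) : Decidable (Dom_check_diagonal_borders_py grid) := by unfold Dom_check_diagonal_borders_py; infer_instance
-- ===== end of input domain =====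

-- B replaces A's BFS flood-fill labelling by synchronous min-label propagation to a
-- fixpoint, and A's early-return diagonal scan by collecting the violating crossings
-- from the label array alone (alternative algorithm); equivalence proved on grids
-- whose rows all have length ≥ len(grid) (elsewhere A raises IndexError).


-- ===== PORT A =====
-- grid[i][j] (total form; every use is either in range by the loop bounds and Pre_, or
-- guarded in range by the BFS bounds check)
def pvCell (grid : List (List String)) (i j : Int) : String :=
  PySem.List.pyGetD (PySem.List.pyGetD grid i []) j ""

def pvDirs : List (Int × Int) := [(0,1),(1,0),(0,-1),(-1,0)]

-- body of A's `for dr, dc in …` loop: push an unvisited non-"A" in-bounds neighbour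
def pvPush (grid : List (List String)) (n : Int) (p : Int × Int)
    (qv : List (Int × Int) × PySem.Set (Int × Int)) (d : Int × Int) :
    List (Int × Int) × PySem.Set (Int × Int) :=
  let np : Int × Int := (p.1 + d.1, p.2 + d.2)
  if 0 ≤ np.1 ∧ np.1 < n ∧ 0 ≤ np.2 ∧ np.2 < n ∧ pvCell grid np.1 np.2 ≠ "A" ∧
      ¬ PySem.Set.contains qv.2 np then
    (qv.1 ++ [np], PySem.Set.add qv.2 np)
  else qv

-- A's `while queue:` loop; the fuel only makes it total (it is proved never to run out)
def pvBfs (grid : List (List String)) (n : Int) (id : Int) :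
    Nat → List (Int × Int) → PySem.Dict (Int × Int) Int → PySem.Set (Int × Int) →
    PySem.Dict (Int × Int) Int × PySem.Set (Int × Int)
  | 0, _, m, v => (m, v)
  | _ + 1, [], m, v => (m, v)
  | fuel + 1, p :: q, m, v =>
    let m' := m.insert p id
    let qv := pvDirs.foldl (pvPush grid n p) (q, v)
    pvBfs grid n id fuel qv.1 m' qv.2

-- A's first double loop: build island_map
def pvStep (grid : List (List String)) (n : Int)
    (st : PySem.Dict (Int × Int) Int × Int × PySem.Set (Int × Int)) (p : Int × Int) :
    PySem.Dict (Int × Int) Int × Int × PySem.Set (Int × Int) :=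
  if pvCell grid p.1 p.2 ≠ "A" ∧ ¬ PySem.Set.contains st.2.2 p then
    let v := PySem.Set.add st.2.2 p
    let mv := pvBfs grid n st.2.1 (grid.length * grid.length + 1) [p] st.1 v
    (mv.1, st.2.1 + 1, mv.2)
  else st

def pvPhase1 (grid : List (List String)) : PySem.Dict (Int × Int) Int :=
  let n : Int := (grid.length : Int)
  (((PySem.List.pyRange 0 n 1).foldl (fun st i =>
    (PySem.List.pyRange 0 n 1).foldl (fun st j => pvStep grid n st (i, j)) st)
    ((PySem.Dict.empty : PySem.Dict (Int × Int) Int), (0 : Int),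
     (PySem.Set.empty : PySem.Set (Int × Int))))).1

-- A's second double loop (early `return False` ⇔ List.all)
def check_diagonal_borders_py (grid : List (List String)) : Bool :=
  let n : Int := (grid.length : Int)
  let m := pvPhase1 grid
  (PySem.List.pyRange 0 (n - 1) 1).all (fun i =>
    (PySem.List.pyRange 0 (n - 1) 1).all (fun j =>
      (if pvCell grid i j ≠ "A" ∧ pvCell grid (i+1) (j+1) ≠ "A" ∧
          pvCell grid i (j+1) = "A" ∧ pvCell grid (i+1) j = "A" then
        decide (m.get? (i, j) = m.get? (i+1, j+1))
      else true) &&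
      (if pvCell grid i (j+1) ≠ "A" ∧ pvCell grid (i+1) j ≠ "A" ∧
          pvCell grid i j = "A" ∧ pvCell grid (i+1) (j+1) = "A" then
        decide (m.get? (i, j+1) = m.get? (i+1, j))
      else true)))

-- ===== PORT B =====
def pvLabAt (lab : List (List Int)) (i j : Int) : Int :=
  PySem.List.pyGetD (PySem.List.pyGetD lab i []) j (-1)

def pvNbrs (i j : Int) : List (Int × Int) := [(i, j+1), (i+1, j), (i, j-1), (i-1, j)]

-- B's inner `for r, c in …` loop: minimum over the non-(-1) in-bounds neighbour labels
def pvMinNbr (n : Int) (lab : List (List Int)) (i j : Int) (m0 : Int) : Int :=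
  (pvNbrs i j).foldl (fun m rc =>
    if 0 ≤ rc.1 ∧ rc.1 < n ∧ 0 ≤ rc.2 ∧ rc.2 < n ∧
        pvLabAt lab rc.1 rc.2 ≠ -1 ∧ pvLabAt lab rc.1 rc.2 < m then
      pvLabAt lab rc.1 rc.2
    else m) m0

-- one synchronous round of B's `while changed:` body: (new labels, changed?)
def pvRound (n : Int) (lab : List (List Int)) : List (List Int) × Bool :=
  (PySem.List.pyRange 0 n 1).foldl (fun acc i =>
    let rc := (PySem.List.pyRange 0 n 1).foldl (fun (rc : List Int × Bool) j =>
      let m0 := pvLabAt lab i j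
      if m0 ≠ -1 then
        let m := pvMinNbr n lab i j m0
        (rc.1 ++ [m], rc.2 || decide (m ≠ m0))
      else (rc.1 ++ [m0], rc.2)) ([], acc.2)
    (acc.1 ++ [rc.1], rc.2)) ([], false)

-- B's `while changed:` loop; the fuel only makes it total (proved never to run out)
def pvLoop (n : Int) : Nat → List (List Int) → List (List Int)
  | 0, lab => lab
  | fuel + 1, lab =>
    let r := pvRound n lab
    if r.2 then pvLoop n fuel r.1 else r.1

def pvLab0 (grid : List (List String)) : List (List Int) :=
  let n : Int := (grid.length : Int)
  (PySem.List.pyRange 0 n 1).map (fun i =>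
    (PySem.List.pyRange 0 n 1).map (fun j =>
      if pvCell grid i j ≠ "A" then i * n + j else -1))

def pvLabels (grid : List (List String)) : List (List Int) :=
  let n := grid.length
  pvLoop (n : Int) (n * n * n * n + 1) (pvLab0 grid)

-- B's violation test at a diagonal crossing: reads only labels (-1 marks an "A" cell)
def pvViol (lab : List (List Int)) (i j : Int) : Bool :=
  (pvLabAt lab i j != -1 && pvLabAt lab (i+1) (j+1) != -1 &&
   pvLabAt lab i (j+1) == -1 && pvLabAt lab (i+1) j == -1 &&
   pvLabAt lab i j != pvLabAt lab (i+1) (j+1)) ||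
  (pvLabAt lab i (j+1) != -1 && pvLabAt lab (i+1) j != -1 &&
   pvLabAt lab i j == -1 && pvLabAt lab (i+1) (j+1) == -1 &&
   pvLabAt lab i (j+1) != pvLabAt lab (i+1) j)

-- B's `bad = [(i, j) for … if …]; return not bad`
def check_diagonal_borders_py_alt (grid : List (List String)) : Bool :=
  let n : Int := (grid.length : Int)
  let lab := pvLabels grid
  ((PySem.List.pyRange 0 (n - 1) 1).flatMap (fun i =>
    ((PySem.List.pyRange 0 (n - 1) 1).filter (fun j => pvViol lab i j)).map
      (fun j => (i, j)))).isEmpty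

-- ===== PRECONDITION & SPEC =====
-- Pre_ excludes exactly the grids on which A raises IndexError: some row shorter than
-- len(grid) (both programs index grid[i][j] for all i, j < len(grid)).
def Pre_check_diagonal_borders_py (grid : List (List String)) : Prop :=
  ∀ row ∈ grid, grid.length ≤ row.length
instance (grid : List (List String)) : Decidable (Pre_check_diagonal_borders_py grid) := by
  unfold Pre_check_diagonal_borders_py; infer_instance

def pvWitness_check_diagonal_borders_py : List (List String) :=
  [["B", "A"], ["A", "B"]]

def Spec_check_diagonal_borders_py (grid : List (List String)) (out : Bool) : Prop := out = check_diagonal_borders_py_alt grid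
instance (grid : List (List String)) (out : Bool) : Decidable (Spec_check_diagonal_borders_py grid out) := by unfold Spec_check_diagonal_borders_py; infer_instance

-- ===== CLAIM (what is proved, stated in full; the proofs are below) =====
def Claim_equal_check_diagonal_borders_py : Prop := ∀ (grid : List (List String)), Dom_check_diagonal_borders_py grid → Pre_check_diagonal_borders_py grid → Spec_check_diagonal_borders_py grid (check_diagonal_borders_py grid)

-- ===== LEMMAS AND PROOFS =====

-- shared notions: in-bounds cells, non-"A" cells, orthogonal adjacency, connectivity
def pvInB (N : Nat) (p : Int × Int) : Prop :=
  0 ≤ p.1 ∧ p.1 < (N : Int) ∧ 0 ≤ p.2 ∧ p.2 < (N : Int)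

def pvNonA (grid : List (List String)) (p : Int × Int) : Prop :=
  pvInB grid.length p ∧ pvCell grid p.1 p.2 ≠ "A"

def pvAdjacent (grid : List (List String)) (p q : Int × Int) : Prop :=
  pvNonA grid p ∧ pvNonA grid q ∧ ((q.1 - p.1).natAbs + (q.2 - p.2).natAbs = 1)

def pvConn (grid : List (List String)) : (Int × Int) → (Int × Int) → Prop :=
  Relation.ReflTransGen (pvAdjacent grid)

theorem pvAdjacent_symm {grid : List (List String)} {p q : Int × Int}
    (h : pvAdjacent grid p q) : pvAdjacent grid q p := by
  obtain ⟨h1, h2, h3⟩ := h; exact ⟨h2, h1, by omega⟩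

theorem pvConn_symm {grid : List (List String)} {p q : Int × Int}
    (h : pvConn grid p q) : pvConn grid q p := by
  induction h with
  | refl => exact Relation.ReflTransGen.refl
  | tail _ hadj ih => exact Relation.ReflTransGen.head (pvAdjacent_symm hadj) ih

-- ============ B side ============

def pvLin (N : Nat) (m : Int × Int) : Int := m.1 * (N : Int) + m.2

theorem pvLin_inj {N : Nat} {m m' : Int × Int} (hm : pvInB N m) (hm' : pvInB N m')
    (h : pvLin N m = pvLin N m') : m = m' := by
  obtain ⟨a, b⟩ := m; obtain ⟨c, d⟩ := m'
  simp only [pvLin] at h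
  obtain ⟨h1, h2, h3, h4⟩ := hm; obtain ⟨h5, h6, h7, h8⟩ := hm'
  simp only at *
  have h' : (a - c) * (N : Int) = d - b := by linear_combination h
  have hac : a = c := by
    by_contra hne
    rcases lt_or_gt_of_ne hne with hlt | hgt
    · have : (a - c) * (N : Int) ≤ (-1) * (N : Int) :=
        mul_le_mul_of_nonneg_right (by omega) (by omega)
      omega
    · have : (1 : Int) * (N : Int) ≤ (a - c) * (N : Int) :=
        mul_le_mul_of_nonneg_right (by omega) (by omega)
      omega
  subst hac
  have : b = d := by omega
  simp [this]

-- invariant of B's label array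
def pvInv (grid : List (List String)) (lab : List (List Int)) : Prop :=
  ∀ i j : Int, pvInB grid.length (i, j) →
    (pvNonA grid (i, j) →
      ∃ m, pvConn grid (i, j) m ∧ pvNonA grid m ∧ pvLabAt lab i j = pvLin grid.length m) ∧
    (¬ pvNonA grid (i, j) → pvLabAt lab i j = -1)

def pvNewL (n : Int) (lab : List (List Int)) (i j : Int) : Int :=
  if pvLabAt lab i j ≠ -1 then pvMinNbr n lab i j (pvLabAt lab i j) else pvLabAt lab i j

def pvChg (n : Int) (lab : List (List Int)) (i j : Int) : Bool :=
  if pvLabAt lab i j ≠ -1 then decide (pvMinNbr n lab i j (pvLabAt lab i j) ≠ pvLabAt lab i j)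
  else false

theorem pv_pair_fold {α β : Type} (l : List α) (f : α → β) (g : α → Bool) :
    ∀ (acc : List β) (b : Bool),
      l.foldl (fun rc x => (rc.1 ++ [f x], rc.2 || g x)) (acc, b) =
        (acc ++ l.map f, b || l.any g) := by
  induction l with
  | nil => simp
  | cons x t ih => intro acc b; simp [ih, Bool.or_assoc]

theorem pvRound_eq (n : Int) (lab : List (List Int)) :
    pvRound n lab =
      ((PySem.List.pyRange 0 n 1).map (fun i =>
        (PySem.List.pyRange 0 n 1).map (fun j => pvNewL n lab i j)),
       (PySem.List.pyRange 0 n 1).any (fun i =>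
        (PySem.List.pyRange 0 n 1).any (fun j => pvChg n lab i j))) := by
  unfold pvRound
  have h1 : ∀ (i : Int) (rc0 : List Int × Bool),
      (PySem.List.pyRange 0 n 1).foldl (fun (rc : List Int × Bool) j =>
        let m0 := pvLabAt lab i j
        if m0 ≠ -1 then
          let m := pvMinNbr n lab i j m0
          (rc.1 ++ [m], rc.2 || decide (m ≠ m0))
        else (rc.1 ++ [m0], rc.2)) rc0 =
      (rc0.1 ++ (PySem.List.pyRange 0 n 1).map (fun j => pvNewL n lab i j),
       rc0.2 || (PySem.List.pyRange 0 n 1).any (fun j => pvChg n lab i j)) := by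
    intro i rc0
    have hfun : (fun (rc : List Int × Bool) j =>
        let m0 := pvLabAt lab i j
        if m0 ≠ -1 then
          let m := pvMinNbr n lab i j m0
          (rc.1 ++ [m], rc.2 || decide (m ≠ m0))
        else (rc.1 ++ [m0], rc.2)) =
        (fun (rc : List Int × Bool) x =>
          (rc.1 ++ [pvNewL n lab i x], rc.2 || pvChg n lab i x)) := by
      funext rc j
      by_cases h : pvLabAt lab i j = -1 <;> simp [pvNewL, pvChg, h]
    rw [hfun]
    obtain ⟨a, b⟩ := rc0
    exact pv_pair_fold _ _ _ a b
  have h2 : (fun (acc : List (List Int) × Bool) i =>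
      let rc := (PySem.List.pyRange 0 n 1).foldl (fun (rc : List Int × Bool) j =>
        let m0 := pvLabAt lab i j
        if m0 ≠ -1 then
          let m := pvMinNbr n lab i j m0
          (rc.1 ++ [m], rc.2 || decide (m ≠ m0))
        else (rc.1 ++ [m0], rc.2)) ([], acc.2)
      (acc.1 ++ [rc.1], rc.2)) =
      (fun (acc : List (List Int) × Bool) x =>
        (acc.1 ++ [(PySem.List.pyRange 0 n 1).map (fun j => pvNewL n lab x j)],
         acc.2 || (PySem.List.pyRange 0 n 1).any (fun j => pvChg n lab x j))) := by
    funext acc i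
    rw [h1 i ([], acc.2)]
    simp
  rw [h2, pv_pair_fold]
  simp

theorem pvLabAt_round {n : Int} {lab : List (List Int)} {i j : Int}
    (hi : 0 ≤ i) (hi2 : i < n) (hj : 0 ≤ j) (hj2 : j < n) :
    pvLabAt (pvRound n lab).1 i j = pvNewL n lab i j := by
  rw [pvRound_eq]
  unfold pvLabAt
  rw [PySem.List.pyGetD_map_pyRange_of_nonneg _ _ _ _ hi hi2]
  rw [PySem.List.pyGetD_map_pyRange_of_nonneg _ _ _ _ hj hj2]

-- the fold in pvMinNbr: closure under a predicate, and lower bounds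
theorem pvMinNbr_closure {n : Int} {lab : List (List Int)} {i j m0 : Int}
    (P : Int → Prop) (h0 : P m0)
    (h : ∀ rc ∈ pvNbrs i j,
      (0 ≤ rc.1 ∧ rc.1 < n ∧ 0 ≤ rc.2 ∧ rc.2 < n ∧ pvLabAt lab rc.1 rc.2 ≠ -1) →
      P (pvLabAt lab rc.1 rc.2)) :
    P (pvMinNbr n lab i j m0) := by
  unfold pvMinNbr
  revert h0 h
  generalize pvNbrs i j = l
  induction l generalizing m0 with
  | nil => intro h0 _; simpa using h0
  | cons x t ih =>
    intro h0 h
    simp only [List.foldl_cons]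
    split
    · exact ih (h x (by simp) (by tauto)) (fun rc hrc hs => h rc (by simp [hrc]) hs)
    · exact ih h0 (fun rc hrc hs => h rc (by simp [hrc]) hs)

theorem pvMinNbr_fold_le {n : Int} (lab : List (List Int)) (_i _j : Int) :
    ∀ (l : List (Int × Int)) (m0 : Int),
      l.foldl (fun m rc =>
        if 0 ≤ rc.1 ∧ rc.1 < n ∧ 0 ≤ rc.2 ∧ rc.2 < n ∧
            pvLabAt lab rc.1 rc.2 ≠ -1 ∧ pvLabAt lab rc.1 rc.2 < m then
          pvLabAt lab rc.1 rc.2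
        else m) m0 ≤ m0 := by
  intro l
  induction l with
  | nil => simp
  | cons x t ih =>
    intro m0
    simp only [List.foldl_cons]
    split
    · calc _ ≤ pvLabAt lab x.1 x.2 := ih _
        _ ≤ m0 := by omega
    · exact ih m0

theorem pvMinNbr_le {n : Int} (lab : List (List Int)) (i j m0 : Int) :
    pvMinNbr n lab i j m0 ≤ m0 := pvMinNbr_fold_le lab i j _ m0

theorem pvMinNbr_le_mem {n : Int} {lab : List (List Int)} {i j m0 : Int} {rc : Int × Int}
    (hmem : rc ∈ pvNbrs i j)
    (hg : 0 ≤ rc.1 ∧ rc.1 < n ∧ 0 ≤ rc.2 ∧ rc.2 < n ∧ pvLabAt lab rc.1 rc.2 ≠ -1) :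
    pvMinNbr n lab i j m0 ≤ pvLabAt lab rc.1 rc.2 := by
  unfold pvMinNbr
  revert m0
  have main : ∀ (l : List (Int × Int)), rc ∈ l → ∀ m0 : Int,
      l.foldl (fun m rc =>
        if 0 ≤ rc.1 ∧ rc.1 < n ∧ 0 ≤ rc.2 ∧ rc.2 < n ∧
            pvLabAt lab rc.1 rc.2 ≠ -1 ∧ pvLabAt lab rc.1 rc.2 < m then
          pvLabAt lab rc.1 rc.2
        else m) m0 ≤ pvLabAt lab rc.1 rc.2 := by
    intro l
    induction l with
    | nil => simp
    | cons x t ih =>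
      intro hmem m0
      rcases List.mem_cons.mp hmem with rfl | hmem'
      · simp only [List.foldl_cons]
        by_cases hlt : pvLabAt lab rc.1 rc.2 < m0
        · rw [if_pos (by tauto)]
          exact pvMinNbr_fold_le lab i j t _
        · rw [if_neg (by tauto)]
          calc _ ≤ m0 := pvMinNbr_fold_le lab i j t _
            _ ≤ _ := by omega
      · simp only [List.foldl_cons]; exact ih hmem' _
  intro m0
  exact main (pvNbrs i j) hmem m0

theorem pvAdjacent_mem_nbrs {grid : List (List String)} {p q : Int × Int}
    (h : pvAdjacent grid p q) : q ∈ pvNbrs p.1 p.2 := by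
  obtain ⟨_, _, h3⟩ := h
  have hc : (q.1 = p.1 ∧ (q.2 = p.2 + 1 ∨ q.2 = p.2 - 1)) ∨
      (q.2 = p.2 ∧ (q.1 = p.1 + 1 ∨ q.1 = p.1 - 1)) := by omega
  simp only [pvNbrs, List.mem_cons, List.not_mem_nil, or_false]
  obtain ⟨a, b⟩ := q
  simp only [Prod.mk.injEq] at *
  omega

theorem pvNbrs_adjacent {grid : List (List String)} {p : Int × Int} {rc : Int × Int}
    (hmem : rc ∈ pvNbrs p.1 p.2) (hp : pvNonA grid p) (hrc : pvNonA grid rc) :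
    pvAdjacent grid p rc := by
  refine ⟨hp, hrc, ?_⟩
  simp only [pvNbrs, List.mem_cons, List.not_mem_nil, or_false] at hmem
  obtain ⟨a, b⟩ := rc
  rcases hmem with h | h | h | h <;> simp_all

-- under pvInv, a label is ≥ -1 and ≠ -1 exactly on non-"A" cells
theorem pvLin_nonneg {N : Nat} {m : Int × Int} (hm : pvInB N m) : 0 ≤ pvLin N m := by
  obtain ⟨h1, h2, h3, h4⟩ := hm
  have : 0 ≤ m.1 * (N : Int) := mul_nonneg h1 (by positivity)
  unfold pvLin; omega

theorem pvInv_labAt_ge {grid : List (List String)} {lab : List (List Int)}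
    (hInv : pvInv grid lab) {i j : Int} (hin : pvInB grid.length (i, j)) :
    -1 ≤ pvLabAt lab i j := by
  obtain ⟨h1, h2⟩ := hInv i j hin
  by_cases hna : pvNonA grid (i, j)
  · obtain ⟨m, _, hm, heq⟩ := h1 hna
    rw [heq]
    have := pvLin_nonneg hm.1
    omega
  · rw [h2 hna]

theorem pvInv_labAt_ne {grid : List (List String)} {lab : List (List Int)}
    (hInv : pvInv grid lab) {i j : Int} (hin : pvInB grid.length (i, j)) :
    pvLabAt lab i j ≠ -1 ↔ pvNonA grid (i, j) := by
  obtain ⟨h1, h2⟩ := hInv i j hin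
  constructor
  · intro hne
    by_contra hna
    exact hne (h2 hna)
  · intro hna
    obtain ⟨m, _, hm, heq⟩ := h1 hna
    rw [heq]
    have := pvLin_nonneg hm.1
    omega

-- pvInv is preserved by a round
theorem pvInv_round {grid : List (List String)} {lab : List (List Int)}
    (hInv : pvInv grid lab) :
    pvInv grid (pvRound (grid.length : Int) lab).1 := by
  intro i j hin
  obtain ⟨hb1, hb2, hb3, hb4⟩ := hin
  rw [pvLabAt_round hb1 hb2 hb3 hb4]
  obtain ⟨h1, h2⟩ := hInv i j ⟨hb1, hb2, hb3, hb4⟩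
  constructor
  · intro hna
    obtain ⟨m, hconn, hm, heq⟩ := h1 hna
    unfold pvNewL
    rw [if_pos (by rw [(pvInv_labAt_ne hInv ⟨hb1, hb2, hb3, hb4⟩)]; exact hna)]
    apply pvMinNbr_closure (P := fun x =>
      ∃ m, pvConn grid (i, j) m ∧ pvNonA grid m ∧ x = pvLin grid.length m)
    · exact ⟨m, hconn, hm, heq⟩
    · intro rc hrc hg
      have hrcin : pvInB grid.length rc := ⟨hg.1, hg.2.1, hg.2.2.1, hg.2.2.2.1⟩
      have hrcin' : pvInB grid.length (rc.1, rc.2) := hrcin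
      have hrcna : pvNonA grid (rc.1, rc.2) :=
        (pvInv_labAt_ne hInv hrcin').mp hg.2.2.2.2
      obtain ⟨m', hconn', hm', heq'⟩ := (hInv rc.1 rc.2 hrcin').1 hrcna
      refine ⟨m', ?_, hm', heq'⟩
      have hadj : pvAdjacent grid (i, j) rc := pvNbrs_adjacent hrc hna (by simpa using hrcna)
      exact Relation.ReflTransGen.trans (Relation.ReflTransGen.single hadj) hconn'
  · intro hna
    unfold pvNewL
    rw [if_neg (by simp only [ne_eq, not_not]; exact h2 hna)]
    exact h2 hna

-- the measure
def pvMu (N : Nat) (lab : List (List Int)) : Nat :=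
  ∑ a ∈ Finset.range N, ∑ b ∈ Finset.range N, (pvLabAt lab (a : Int) (b : Int) + 1).toNat

theorem pvMu_round_lt {grid : List (List String)} {lab : List (List Int)}
    (hInv : pvInv grid lab)
    (hch : (pvRound (grid.length : Int) lab).2 = true) :
    pvMu grid.length (pvRound (grid.length : Int) lab).1 < pvMu grid.length lab := by
  rw [pvRound_eq] at hch
  simp only [List.any_eq_true, PySem.List.mem_pyRange_one] at hch
  obtain ⟨i, ⟨hi1, hi2⟩, j, ⟨hj1, hj2⟩, hcij⟩ := hch
  have hmono : ∀ (a b : Nat), a < grid.length → b < grid.length →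
      (pvLabAt (pvRound (grid.length : Int) lab).1 (a : Int) (b : Int) + 1).toNat ≤
      (pvLabAt lab (a : Int) (b : Int) + 1).toNat := by
    intro a b ha hb
    rw [pvLabAt_round (by positivity) (by exact_mod_cast ha) (by positivity) (by exact_mod_cast hb)]
    unfold pvNewL
    split
    · have := pvMinNbr_le lab (a : Int) (b : Int) (pvLabAt lab (a : Int) (b : Int))
        (n := (grid.length : Int))
      omega
    · omega
  unfold pvMu
  apply Finset.sum_lt_sum
  · intro a ha
    apply Finset.sum_le_sum
    intro b hb
    exact hmono a b (Finset.mem_range.mp ha) (Finset.mem_range.mp hb)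
  · refine ⟨i.toNat, Finset.mem_range.mpr (by omega), ?_⟩
    apply Finset.sum_lt_sum
    · intro b hb
      exact hmono i.toNat b (by omega) (Finset.mem_range.mp hb)
    · refine ⟨j.toNat, Finset.mem_range.mpr (by omega), ?_⟩
      have hci : (i.toNat : Int) = i := by omega
      have hcj : (j.toNat : Int) = j := by omega
      rw [hci, hcj]
      rw [pvLabAt_round hi1 hi2 hj1 hj2]
      unfold pvChg at hcij
      unfold pvNewL
      have hin : pvInB grid.length (i, j) := ⟨hi1, hi2, hj1, hj2⟩
      split at hcij
      · simp only [decide_eq_true_eq] at hcij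
        rw [if_pos (by assumption)]
        have hle := pvMinNbr_le lab i j (pvLabAt lab i j) (n := (grid.length : Int))
        have hlt : pvMinNbr (grid.length : Int) lab i j (pvLabAt lab i j) < pvLabAt lab i j := by
          omega
        have hge : -1 ≤ pvMinNbr (grid.length : Int) lab i j (pvLabAt lab i j) := by
          apply pvMinNbr_closure (P := fun x => -1 ≤ x)
          · exact pvInv_labAt_ge hInv hin
          · intro rc hrc hg
            exact pvInv_labAt_ge hInv ⟨hg.1, hg.2.1, hg.2.2.1, hg.2.2.2.1⟩
        omega
      · simp at hcij

-- if nothing changed, the new array agrees with the old one in bounds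
theorem pvRound_fix {grid : List (List String)} {lab : List (List Int)}
    (hch : (pvRound (grid.length : Int) lab).2 = false) {i j : Int}
    (hin : pvInB grid.length (i, j)) :
    pvLabAt (pvRound (grid.length : Int) lab).1 i j = pvLabAt lab i j := by
  obtain ⟨h1, h2, h3, h4⟩ := hin
  rw [pvLabAt_round h1 h2 h3 h4]
  rw [pvRound_eq] at hch
  simp only [List.any_eq_false, PySem.List.mem_pyRange_one, Bool.not_eq_true] at hch
  have hc := hch i ⟨h1, h2⟩ j ⟨h3, h4⟩
  unfold pvChg at hc
  unfold pvNewL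
  split at hc
  · simp only [decide_eq_false_iff_not, Decidable.not_not] at hc
    rw [if_pos (by assumption)]
    exact hc
  · rw [if_neg (by assumption)]

-- round/inv/chg only read in-bounds labels
theorem pvChg_congr {grid : List (List String)} {lab lab' : List (List Int)}
    (h : ∀ i j : Int, pvInB grid.length (i, j) → pvLabAt lab i j = pvLabAt lab' i j)
    {i j : Int} (hin : pvInB grid.length (i, j)) :
    pvChg (grid.length : Int) lab i j = pvChg (grid.length : Int) lab' i j := by
  have hmn : ∀ m0 : Int, pvMinNbr (grid.length : Int) lab i j m0 =
      pvMinNbr (grid.length : Int) lab' i j m0 := by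
    intro m0
    unfold pvMinNbr
    generalize pvNbrs i j = l
    induction l generalizing m0 with
    | nil => rfl
    | cons x t ih =>
      simp only [List.foldl_cons]
      by_cases hb : 0 ≤ x.1 ∧ x.1 < (grid.length : Int) ∧ 0 ≤ x.2 ∧ x.2 < (grid.length : Int)
      · have hx : pvLabAt lab x.1 x.2 = pvLabAt lab' x.1 x.2 :=
          h x.1 x.2 ⟨hb.1, hb.2.1, hb.2.2.1, hb.2.2.2⟩
        rw [hx]
        by_cases hg : pvLabAt lab' x.1 x.2 ≠ -1 ∧ pvLabAt lab' x.1 x.2 < m0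
        · rw [if_pos (by tauto)]
          exact ih _
        · rw [if_neg (by tauto)]
          exact ih _
      · rw [if_neg (show ¬(0 ≤ x.1 ∧ x.1 < (grid.length:Int) ∧ 0 ≤ x.2 ∧ x.2 < (grid.length:Int) ∧ pvLabAt lab x.1 x.2 ≠ -1 ∧ pvLabAt lab x.1 x.2 < m0) by tauto)]
        rw [if_neg (show ¬(0 ≤ x.1 ∧ x.1 < (grid.length:Int) ∧ 0 ≤ x.2 ∧ x.2 < (grid.length:Int) ∧ pvLabAt lab' x.1 x.2 ≠ -1 ∧ pvLabAt lab' x.1 x.2 < m0) by tauto)]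
        exact ih _
  unfold pvChg
  rw [h i j hin, hmn]

theorem pvInv_congr {grid : List (List String)} {lab lab' : List (List Int)}
    (h : ∀ i j : Int, pvInB grid.length (i, j) → pvLabAt lab i j = pvLabAt lab' i j)
    (hInv : pvInv grid lab) : pvInv grid lab' := by
  intro i j hin
  obtain ⟨h1, h2⟩ := hInv i j hin
  rw [← h i j hin]
  exact ⟨h1, h2⟩

-- the loop reaches a genuine fixpoint
theorem pvLoop_spec {grid : List (List String)} :
    ∀ (fuel : Nat) (lab : List (List Int)), pvInv grid lab → pvMu grid.length lab < fuel →
      pvInv grid (pvLoop (grid.length : Int) fuel lab) ∧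
      ∀ i j : Int, pvInB grid.length (i, j) →
        pvChg (grid.length : Int) (pvLoop (grid.length : Int) fuel lab) i j = false := by
  intro fuel
  induction fuel with
  | zero => intro lab _ hmu; omega
  | succ fuel ih =>
    intro lab hInv hmu
    by_cases hch : (pvRound (grid.length : Int) lab).2 = true
    · have hres : pvLoop (grid.length : Int) (fuel + 1) lab =
          pvLoop (grid.length : Int) fuel (pvRound (grid.length : Int) lab).1 := by
        simp [pvLoop, hch]
      rw [hres]
      have hlt := pvMu_round_lt hInv hch
      exact ih _ (pvInv_round hInv) (by omega)
    · rw [Bool.not_eq_true] at hch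
      have hres : pvLoop (grid.length : Int) (fuel + 1) lab =
          (pvRound (grid.length : Int) lab).1 := by
        simp [pvLoop, hch]
      rw [hres]
      have hagree : ∀ i j : Int, pvInB grid.length (i, j) →
          pvLabAt lab i j = pvLabAt (pvRound (grid.length : Int) lab).1 i j := by
        intro i j hin
        exact (pvRound_fix hch hin).symm
      constructor
      · exact pvInv_congr hagree hInv
      · intro i j hin
        rw [← pvChg_congr hagree hin]
        rw [pvRound_eq] at hch
        simp only [List.any_eq_false, PySem.List.mem_pyRange_one, Bool.not_eq_true] at hch
        obtain ⟨h1, h2, h3, h4⟩ := hin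
        exact hch i ⟨h1, h2⟩ j ⟨h3, h4⟩

theorem pvLabAt_lab0 (grid : List (List String)) {i j : Int}
    (hi : 0 ≤ i) (hi2 : i < (grid.length : Int)) (hj : 0 ≤ j) (hj2 : j < (grid.length : Int)) :
    pvLabAt (pvLab0 grid) i j =
      if pvCell grid i j ≠ "A" then i * (grid.length : Int) + j else -1 := by
  unfold pvLab0 pvLabAt
  rw [PySem.List.pyGetD_map_pyRange_of_nonneg _ _ _ _ hi hi2]
  rw [PySem.List.pyGetD_map_pyRange_of_nonneg _ _ _ _ hj hj2]

theorem pvInv_lab0 (grid : List (List String)) : pvInv grid (pvLab0 grid) := by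
  intro i j hin
  obtain ⟨h1, h2, h3, h4⟩ := hin
  rw [pvLabAt_lab0 grid h1 h2 h3 h4]
  constructor
  · intro hna
    refine ⟨(i, j), Relation.ReflTransGen.refl, hna, ?_⟩
    rw [if_pos hna.2]
    rfl
  · intro hna
    rw [if_neg ?_]
    intro hc
    exact hna ⟨⟨h1, h2, h3, h4⟩, hc⟩

theorem pvMu_lab0_le (grid : List (List String)) :
    pvMu grid.length (pvLab0 grid) ≤ grid.length * grid.length * grid.length * grid.length := by
  have hterm : ∀ a b : Nat, a < grid.length → b < grid.length →
      (pvLabAt (pvLab0 grid) (a : Int) (b : Int) + 1).toNat ≤ grid.length * grid.length := by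
    intro a b ha hb
    have ha' : (a : Int) < (grid.length : Int) := by exact_mod_cast ha
    have hb' : (b : Int) < (grid.length : Int) := by exact_mod_cast hb
    rw [pvLabAt_lab0 grid (by positivity) ha' (by positivity) hb']
    have h3 : (a : Int) * (grid.length : Int) ≤
        ((grid.length : Int) - 1) * (grid.length : Int) :=
      mul_le_mul_of_nonneg_right (by omega) (by positivity)
    have hbound : (a : Int) * (grid.length : Int) + (b : Int) + 1 ≤
        (grid.length : Int) * (grid.length : Int) := by nlinarith
    have hcast : ((grid.length * grid.length : Nat) : Int) =
        (grid.length : Int) * (grid.length : Int) := by push_cast; ring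
    split
    · omega
    · omega
  unfold pvMu
  calc ∑ a ∈ Finset.range grid.length, ∑ b ∈ Finset.range grid.length,
        (pvLabAt (pvLab0 grid) (a : Int) (b : Int) + 1).toNat
      ≤ ∑ _a ∈ Finset.range grid.length, ∑ _b ∈ Finset.range grid.length,
          grid.length * grid.length := by
        apply Finset.sum_le_sum
        intro a ha
        apply Finset.sum_le_sum
        intro b hb
        exact hterm a b (Finset.mem_range.mp ha) (Finset.mem_range.mp hb)
    _ = grid.length * grid.length * grid.length * grid.length := by
        simp [Finset.sum_const, Finset.card_range]
        ring

-- the fixpoint facts instantiated at pvLabels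
theorem pvLabels_fix (grid : List (List String)) :
    pvInv grid (pvLabels grid) ∧
    ∀ i j : Int, pvInB grid.length (i, j) →
      pvChg (grid.length : Int) (pvLabels grid) i j = false := by
  have hspec := pvLoop_spec (grid := grid)
    (grid.length * grid.length * grid.length * grid.length + 1) (pvLab0 grid)
    (pvInv_lab0 grid) (by have := pvMu_lab0_le grid; omega)
  exact hspec

-- the main B-side characterisation: equal final labels = connected
theorem pvLabels_spec {grid : List (List String)} {p q : Int × Int}
    (hp : pvNonA grid p) (hq : pvNonA grid q) :
    pvLabAt (pvLabels grid) p.1 p.2 = pvLabAt (pvLabels grid) q.1 q.2 ↔ pvConn grid p q := by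
  obtain ⟨hInv, hfix⟩ := pvLabels_fix grid
  -- at the fixpoint, adjacent cells carry equal labels
  have hadj_eq : ∀ a b : Int × Int, pvAdjacent grid a b →
      pvLabAt (pvLabels grid) a.1 a.2 = pvLabAt (pvLabels grid) b.1 b.2 := by
    have hle : ∀ a b : Int × Int, pvAdjacent grid a b →
        pvLabAt (pvLabels grid) a.1 a.2 ≤ pvLabAt (pvLabels grid) b.1 b.2 := by
      intro a b hab
      have hain : pvInB grid.length a := hab.1.1
      have hain' : pvInB grid.length (a.1, a.2) := hain
      have hbin : pvInB grid.length (b.1, b.2) := hab.2.1.1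
      have hcab := hfix a.1 a.2 hain'
      unfold pvChg at hcab
      rw [if_pos ((pvInv_labAt_ne hInv hain').mpr hab.1)] at hcab
      simp only [decide_eq_false_iff_not, Decidable.not_not] at hcab
      have hmem := pvAdjacent_mem_nbrs hab
      have hne : pvLabAt (pvLabels grid) b.1 b.2 ≠ -1 :=
        (pvInv_labAt_ne hInv hbin).mpr hab.2.1
      obtain ⟨hb1, hb2, hb3, hb4⟩ := hbin
      have := pvMinNbr_le_mem (lab := pvLabels grid) (m0 := pvLabAt (pvLabels grid) a.1 a.2)
        hmem ⟨hb1, hb2, hb3, hb4, hne⟩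
      omega
    intro a b hab
    exact le_antisymm (hle a b hab) (hle b a (pvAdjacent_symm hab))
  have hconn_eq : ∀ a b : Int × Int, pvConn grid a b →
      pvLabAt (pvLabels grid) a.1 a.2 = pvLabAt (pvLabels grid) b.1 b.2 := by
    intro a b hab
    induction hab with
    | refl => rfl
    | tail _ hadj ih => exact ih.trans (hadj_eq _ _ hadj)
  constructor
  · intro heq
    obtain ⟨mp, hconnp, hmp, heqp⟩ := (hInv p.1 p.2 hp.1).1 (by simpa using hp)
    obtain ⟨mq, hconnq, hmq, heqq⟩ := (hInv q.1 q.2 hq.1).1 (by simpa using hq)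
    have : pvLin grid.length mp = pvLin grid.length mq := by
      rw [← heqp, ← heqq]
      simpa using heq
    have hmm : mp = mq := pvLin_inj hmp.1 hmq.1 this
    subst hmm
    exact Relation.ReflTransGen.trans hconnp (pvConn_symm hconnq)
  · intro hconn
    exact hconn_eq p q hconn

-- at the fixpoint, != -1 / == -1 reflect the grid cell being non-"A" / "A"
theorem pvLab_bne (grid : List (List String)) {i j : Int}
    (hin : pvInB grid.length (i, j)) :
    (pvLabAt (pvLabels grid) i j != -1) = decide (pvCell grid i j ≠ "A") := by
  have h := pvInv_labAt_ne (pvLabels_fix grid).1 hin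
  by_cases hA : pvCell grid i j = "A"
  · have hz : pvLabAt (pvLabels grid) i j = -1 := by
      by_contra hne
      exact ((h.mp hne).2) hA
    simp [hz, hA]
  · have hne : pvLabAt (pvLabels grid) i j ≠ -1 := h.mpr ⟨hin, hA⟩
    simp [hne, hA]

theorem pvLab_beq (grid : List (List String)) {i j : Int}
    (hin : pvInB grid.length (i, j)) :
    (pvLabAt (pvLabels grid) i j == -1) = decide (pvCell grid i j = "A") := by
  have h := pvLab_bne grid hin
  by_cases hA : pvCell grid i j = "A" <;>
    simp_all [bne]

-- ============ A side ============

def pvCells (N : Nat) : Finset (Int × Int) :=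
  (Finset.range N ×ˢ Finset.range N).image (fun ab => ((ab.1 : Int), (ab.2 : Int)))

theorem pv_mem_cells {N : Nat} {p : Int × Int} : p ∈ pvCells N ↔ pvInB N p := by
  unfold pvCells pvInB
  simp only [Finset.mem_image, Finset.mem_product, Finset.mem_range]
  constructor
  · rintro ⟨⟨a, b⟩, ⟨ha, hb⟩, rfl⟩
    simp only
    omega
  · rintro ⟨h1, h2, h3, h4⟩
    refine ⟨(p.1.toNat, p.2.toNat), ⟨by omega, by omega⟩, ?_⟩
    rw [Prod.ext_iff]
    constructor <;> simp <;> omega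

-- the unexplored-cells measure for the BFS fuel argument
def pvRem (N : Nat) (V : List (Int × Int)) : Finset (Int × Int) :=
  (pvCells N).filter (fun x => x ∉ V)

theorem pv_mem_rem {N : Nat} {V : List (Int × Int)} {x : Int × Int} :
    x ∈ pvRem N V ↔ pvInB N x ∧ x ∉ V := by
  unfold pvRem
  rw [Finset.mem_filter, pv_mem_cells]

theorem pvClosed_conn {grid : List (List String)} {V : List (Int × Int)}
    (hcl : ∀ x ∈ V, ∀ y, pvAdjacent grid x y → y ∈ V) {x y : Int × Int}
    (hx : x ∈ V) (hconn : pvConn grid x y) : y ∈ V := by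
  induction hconn with
  | refl => exact hx
  | tail _ hadj ih => exact hcl _ ih _ hadj

theorem pvAdjacent_mem_dirs {grid : List (List String)} {p y : Int × Int}
    (h : pvAdjacent grid p y) : ∃ d ∈ pvDirs, y = (p.1 + d.1, p.2 + d.2) := by
  obtain ⟨_, _, h3⟩ := h
  simp only [pvDirs, List.mem_cons, List.not_mem_nil, or_false]
  obtain ⟨a, b⟩ := y
  simp only [Prod.mk.injEq] at h3 ⊢
  have hc : (a = p.1 ∧ (b = p.2 + 1 ∨ b = p.2 - 1)) ∨
      (b = p.2 ∧ (a = p.1 + 1 ∨ a = p.1 - 1)) := by omega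
  rcases hc with ⟨h1, h2 | h2⟩ | ⟨h1, h2 | h2⟩
  · exact ⟨(0, 1), by simp, by omega, by omega⟩
  · exact ⟨(0, -1), by simp, by omega, by omega⟩
  · exact ⟨(1, 0), by simp, by omega, by omega⟩
  · exact ⟨(-1, 0), by simp, by omega, by omega⟩

theorem pvDirs_adjacent {grid : List (List String)} {p : Int × Int} {d : Int × Int}
    (hd : d ∈ pvDirs) (hp : pvNonA grid p)
    (hx : pvNonA grid (p.1 + d.1, p.2 + d.2)) :
    pvAdjacent grid p (p.1 + d.1, p.2 + d.2) := by
  refine ⟨hp, hx, ?_⟩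
  simp only [pvDirs, List.mem_cons, List.not_mem_nil, or_false] at hd
  rcases hd with rfl | rfl | rfl | rfl <;> simp

-- the four-direction push loop of A's BFS
theorem pvPushFold (grid : List (List String)) (p : Int × Int) :
    ∀ (ds : List (Int × Int)) (q V : List (Int × Int)), V.Nodup → (∀ x ∈ q, x ∈ V) →
    ∃ new : List (Int × Int),
      (ds.foldl (pvPush grid (grid.length : Int) p) (q, V)).1 = q ++ new ∧
      (ds.foldl (pvPush grid (grid.length : Int) p) (q, V)).2.Nodup ∧
      new.Nodup ∧
      (∀ x, x ∈ (ds.foldl (pvPush grid (grid.length : Int) p) (q, V)).2 ↔ x ∈ V ∨ x ∈ new) ∧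
      (∀ x ∈ new, x ∉ V ∧ pvNonA grid x ∧ ∃ d ∈ ds, x = (p.1 + d.1, p.2 + d.2)) ∧
      (∀ d ∈ ds, pvNonA grid (p.1 + d.1, p.2 + d.2) →
        (p.1 + d.1, p.2 + d.2) ∈ (ds.foldl (pvPush grid (grid.length : Int) p) (q, V)).2) := by
  intro ds
  induction ds with
  | nil =>
    intro q V hV hqV
    exact ⟨[], by simp, hV, by simp, by simp, by simp, by simp⟩
  | cons d ds ih =>
    intro q V hV hqV
    simp only [List.foldl_cons]
    by_cases hg : 0 ≤ p.1 + d.1 ∧ p.1 + d.1 < (grid.length : Int) ∧ 0 ≤ p.2 + d.2 ∧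
        p.2 + d.2 < (grid.length : Int) ∧ pvCell grid (p.1 + d.1) (p.2 + d.2) ≠ "A" ∧
        ¬ PySem.Set.contains V (p.1 + d.1, p.2 + d.2)
    · have hstep : pvPush grid (grid.length : Int) p (q, V) d =
          (q ++ [(p.1 + d.1, p.2 + d.2)], PySem.Set.add V (p.1 + d.1, p.2 + d.2)) := by
        unfold pvPush
        rw [if_pos hg]
      rw [hstep]
      have hnp_notmem : (p.1 + d.1, p.2 + d.2) ∉ V := by
        intro hmem
        exact hg.2.2.2.2.2 ((PySem.Set.contains_iff _ _).mpr hmem)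
      have hadd : PySem.Set.add V (p.1 + d.1, p.2 + d.2) = V ++ [(p.1 + d.1, p.2 + d.2)] :=
        PySem.Set.add_of_not_mem hnp_notmem
      rw [hadd]
      have hV' : (V ++ [(p.1 + d.1, p.2 + d.2)]).Nodup := by
        apply List.Nodup.append hV (List.nodup_singleton _)
        intro x hx hx'
        simp only [List.mem_singleton] at hx'
        subst hx'
        exact hnp_notmem hx
      obtain ⟨new', h1, h2, h3, h4, h5, h6⟩ := ih (q ++ [(p.1 + d.1, p.2 + d.2)])
        (V ++ [(p.1 + d.1, p.2 + d.2)]) hV'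
        (by intro x hx
            rcases List.mem_append.mp hx with hx | hx
            · exact List.mem_append.mpr (Or.inl (hqV x hx))
            · exact List.mem_append.mpr (Or.inr hx))
      refine ⟨(p.1 + d.1, p.2 + d.2) :: new', ?_, h2, ?_, ?_, ?_, ?_⟩
      · rw [h1]; simp
      · simp only [List.nodup_cons]
        refine ⟨?_, h3⟩
        intro hmem
        have := (h5 _ hmem).1
        simp [List.mem_append] at this
      · intro x
        rw [h4]
        simp [List.mem_append]
        tauto
      · intro x hx
        rcases List.mem_cons.mp hx with rfl | hx
        · exact ⟨hnp_notmem, ⟨⟨hg.1, hg.2.1, hg.2.2.1, hg.2.2.2.1⟩, hg.2.2.2.2.1⟩,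
            ⟨d, by simp, rfl⟩⟩
        · obtain ⟨ha, hb, ⟨d', hd', he⟩⟩ := h5 x hx
          exact ⟨fun hmem => ha (List.mem_append.mpr (Or.inl hmem)), hb,
            ⟨d', by simp [hd'], he⟩⟩
      · intro d' hd' hna
        rcases List.mem_cons.mp hd' with rfl | hd'
        · rw [h4]
          simp [List.mem_append]
        · exact h6 d' hd' hna
    · have hstep : pvPush grid (grid.length : Int) p (q, V) d = (q, V) := by
        unfold pvPush
        rw [if_neg hg]
      rw [hstep]
      obtain ⟨new', h1, h2, h3, h4, h5, h6⟩ := ih q V hV hqV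
      refine ⟨new', h1, h2, h3, h4, ?_, ?_⟩
      · intro x hx
        obtain ⟨ha, hb, ⟨d', hd', he⟩⟩ := h5 x hx
        exact ⟨ha, hb, ⟨d', by simp [hd'], he⟩⟩
      · intro d' hd' hna
        rcases List.mem_cons.mp hd' with rfl | hd'
        · -- the head direction: guard failed, so the neighbour is "A", out of bounds,
          -- or already visited; with hna it must be visited
          have hmem : (p.1 + d'.1, p.2 + d'.2) ∈ V := by
            obtain ⟨⟨hb1, hb2, hb3, hb4⟩, hc⟩ := hna
            by_contra hnm
            exact hg ⟨hb1, hb2, hb3, hb4, hc,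
              fun habs => hnm ((PySem.Set.contains_iff _ _).mp habs)⟩
          rw [h4]
          exact Or.inl hmem
        · exact h6 d' hd' hna

-- full correctness of A's BFS loop
theorem pvBfs_spec (grid : List (List String)) (id : Int) (s : Int × Int)
    (prevV : (Int × Int) → Prop)
    (hprev : ∀ x, prevV x → ¬ pvConn grid s x) :
    ∀ (fuel : Nat) (Q : List (Int × Int)) (m : PySem.Dict (Int × Int) Int)
      (V : List (Int × Int)) (D : (Int × Int) → Prop),
    Q.Nodup →
    (∀ x ∈ Q, pvNonA grid x ∧ pvConn grid s x) →
    V.Nodup →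
    (∀ x, x ∈ V ↔ (prevV x ∨ D x ∨ x ∈ Q)) →
    (∀ x, D x → pvConn grid s x ∧ ∀ y, pvAdjacent grid x y → y ∈ V) →
    (∀ x, D x → x ∉ Q) →
    (s ∈ Q ∨ D s) →
    Q.length + (pvRem grid.length V).card < fuel →
    (∀ x, pvConn grid s x → ¬ D x →
      (pvBfs grid (grid.length : Int) id fuel Q m V).1.get? x = some id) ∧
    (∀ x, (¬ pvConn grid s x ∨ D x) →
      (pvBfs grid (grid.length : Int) id fuel Q m V).1.get? x = m.get? x) ∧
    (∀ x, x ∈ (pvBfs grid (grid.length : Int) id fuel Q m V).2 ↔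
      x ∈ V ∨ pvConn grid s x) ∧
    (pvBfs grid (grid.length : Int) id fuel Q m V).2.Nodup := by
  intro fuel
  induction fuel with
  | zero =>
    intro Q m V D _ _ _ _ _ _ _ hfuel
    omega
  | succ fuel ih =>
    intro Q m V D hQnd hQ hVnd hV hD hDQ hs hfuel
    match hQe : Q with
    | [] =>
      -- everything connected to s is already in D
      have hDs : D s := by
        rcases hs with hs | hs
        · simp at hs
        · exact hs
      have hconnD : ∀ x, pvConn grid s x → D x := by
        intro x hconn
        induction hconn with
        | refl => exact hDs
        | tail hc hadj ih2 =>
          rename_i b c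
          have hbV : c ∈ V := (hD b ih2).2 c hadj
          rcases (hV c).mp hbV with h | h | h
          · exact absurd (Relation.ReflTransGen.tail hc hadj) (hprev c h)
          · exact h
          · simp at h
      refine ⟨?_, ?_, ?_, hVnd⟩
      · intro x hc hnd
        exact absurd (hconnD x hc) hnd
      · intro x _
        rfl
      · intro x
        show x ∈ V ↔ _
        constructor
        · exact Or.inl
        · rintro (h | h)
          · exact h
          · exact (hV x).mpr (Or.inr (Or.inl (hconnD x h)))
    | p :: q =>
      have hpV : p ∈ V := (hV p).mpr (Or.inr (Or.inr (by simp)))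
      have hqV : ∀ x ∈ q, x ∈ V := by
        intro x hx
        exact (hV x).mpr (Or.inr (Or.inr (by simp [hx])))
      obtain ⟨new, h1, h2, h3, h4, h5, h6⟩ := pvPushFold grid p pvDirs q V hVnd hqV
      have hres : pvBfs grid (grid.length : Int) id (fuel + 1) (p :: q) m V =
          pvBfs grid (grid.length : Int) id fuel
            (pvDirs.foldl (pvPush grid (grid.length : Int) p) (q, V)).1
            (m.insert p id)
            (pvDirs.foldl (pvPush grid (grid.length : Int) p) (q, V)).2 := rfl
      rw [hres, h1]
      have hpq := hQ p (by simp)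
      -- facts about new
      have hnew_nonA : ∀ x ∈ new, pvNonA grid x := fun x hx => (h5 x hx).2.1
      have hnew_conn : ∀ x ∈ new, pvConn grid s x := by
        intro x hx
        obtain ⟨_, hna, d, hd, rfl⟩ := (h5 x hx)
        exact Relation.ReflTransGen.tail hpq.2 (pvDirs_adjacent hd hpq.1 hna)
      have hnew_notV : ∀ x ∈ new, x ∉ V := fun x hx => (h5 x hx).1
      -- apply the induction hypothesis
      have happ := ih (q ++ new) (m.insert p id)
        (pvDirs.foldl (pvPush grid (grid.length : Int) p) (q, V)).2
        (fun x => D x ∨ x = p)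
        -- Q' nodup
        (by
          apply List.Nodup.append (by exact (List.nodup_cons.mp hQnd).2) h3
          intro x hx hx'
          exact hnew_notV x hx' (hqV x hx))
        -- Q' properties
        (by
          intro x hx
          rcases List.mem_append.mp hx with hx | hx
          · exact hQ x (by simp [hx])
          · exact ⟨hnew_nonA x hx, hnew_conn x hx⟩)
        h2
        -- V' membership invariant
        (by
          intro x
          rw [h4 x]
          constructor
          · rintro (hx | hx)
            · rcases (hV x).mp hx with h | h | h
              · exact Or.inl h
              · exact Or.inr (Or.inl (Or.inl h))
              · rcases List.mem_cons.mp h with rfl | h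
                · exact Or.inr (Or.inl (Or.inr rfl))
                · exact Or.inr (Or.inr (List.mem_append.mpr (Or.inl h)))
            · exact Or.inr (Or.inr (List.mem_append.mpr (Or.inr hx)))
          · rintro (h | (h | rfl) | h)
            · exact Or.inl ((hV x).mpr (Or.inl h))
            · exact Or.inl ((hV x).mpr (Or.inr (Or.inl h)))
            · exact Or.inl hpV
            · rcases List.mem_append.mp h with h | h
              · exact Or.inl ((hV x).mpr (Or.inr (Or.inr (by simp [h]))))
              · exact Or.inr h)
        -- D' properties
        (by
          rintro x (hx | rfl)
          · refine ⟨(hD x hx).1, ?_⟩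
            intro y hy
            rw [h4 y]
            exact Or.inl ((hD x hx).2 y hy)
          · refine ⟨hpq.2, ?_⟩
            intro y hy
            obtain ⟨d, hd, rfl⟩ := pvAdjacent_mem_dirs hy
            exact h6 d hd hy.2.1)
        -- D' disjoint from Q'
        (by
          rintro x (hx | rfl)
          · intro hmem
            rcases List.mem_append.mp hmem with h | h
            · exact hDQ x hx (by simp [h])
            · exact hnew_notV x h ((hV x).mpr (Or.inr (Or.inl hx)))
          · intro hmem
            rcases List.mem_append.mp hmem with h | h
            · exact (List.nodup_cons.mp hQnd).1 h
            · exact hnew_notV _ h hpV)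
        -- seed tracked
        (by
          rcases hs with hs | hs
          · rcases List.mem_cons.mp hs with rfl | hs
            · exact Or.inr (Or.inr rfl)
            · exact Or.inl (List.mem_append.mpr (Or.inl hs))
          · exact Or.inr (Or.inl hs))
        -- fuel
        (by
          have hsub : (pvRem grid.length
              (pvDirs.foldl (pvPush grid (grid.length : Int) p) (q, V)).2) =
              (pvRem grid.length V) \ new.toFinset := by
            apply Finset.ext
            intro x
            rw [pv_mem_rem, Finset.mem_sdiff, pv_mem_rem, h4, List.mem_toFinset]
            tauto
          have hnsub : new.toFinset ⊆ pvRem grid.length V := by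
            intro x hx
            rw [List.mem_toFinset] at hx
            rw [pv_mem_rem]
            exact ⟨(hnew_nonA x hx).1, hnew_notV x hx⟩
          have hcard : ((pvRem grid.length V) \ new.toFinset).card =
              (pvRem grid.length V).card - new.length := by
            rw [Finset.card_sdiff, Finset.inter_eq_left.mpr hnsub,
              List.toFinset_card_of_nodup h3]
          have hlen : new.length ≤ (pvRem grid.length V).card := by
            calc new.length = new.toFinset.card := (List.toFinset_card_of_nodup h3).symm
              _ ≤ _ := Finset.card_le_card hnsub
          rw [hsub, hcard]
          simp only [List.length_append, List.length_cons] at hfuel ⊢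
          omega)
      obtain ⟨p1a, p1b, p2, p3⟩ := happ
      refine ⟨?_, ?_, ?_, p3⟩
      · intro x hc hnd
        by_cases hxp : x = p
        · subst hxp
          rw [p1b x (Or.inr (Or.inr rfl))]
          exact PySem.Dict.get?_insert_self _ _ _

        · rw [p1a x hc (by tauto)]
      · intro x hc
        have hxp : x ≠ p := by
          rintro rfl
          rcases hc with hc | hc
          · exact hc hpq.2
          · exact hDQ x hc (by simp)
        rw [p1b x (by tauto)]
        exact PySem.Dict.get?_insert_of_ne _ _ hxp
      · intro x
        rw [p2 x, h4 x]
        constructor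
        · rintro ((h | h) | h)
          · exact Or.inl h
          · exact Or.inr (hnew_conn x h)
          · exact Or.inr h
        · rintro (h | h)
          · exact Or.inl (Or.inl h)
          · exact Or.inr h


theorem pv_card_cells (N : Nat) : (pvCells N).card = N * N := by
  unfold pvCells
  rw [Finset.card_image_of_injective]
  · simp [Finset.card_product]
  · intro a b hab
    simp only [Prod.mk.injEq] at hab
    exact Prod.ext (by exact_mod_cast hab.1) (by exact_mod_cast hab.2)

-- invariant of A's outer double loop
def pvOutInv (grid : List (List String)) (done : List (Int × Int))
    (st : PySem.Dict (Int × Int) Int × Int × PySem.Set (Int × Int)) : Prop :=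
  st.2.2.Nodup ∧
  (∀ x ∈ st.2.2, ∀ y, pvAdjacent grid x y → y ∈ st.2.2) ∧
  (∀ x ∈ done, pvNonA grid x → x ∈ st.2.2) ∧
  ∃ seeds : List (Int × Int),
    st.2.1 = (seeds.length : Int) ∧
    seeds.Pairwise (fun a b => ¬ pvConn grid a b) ∧
    (∀ x, x ∈ st.2.2 ↔ ∃ t ∈ seeds, pvConn grid t x) ∧
    (∀ x k, st.1.get? x = some k ↔
      ∃ i : Nat, ∃ h : i < seeds.length, k = (i : Int) ∧ pvConn grid seeds[i] x)

theorem pvStep_inv {grid : List (List String)} {done : List (Int × Int)}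
    {st : PySem.Dict (Int × Int) Int × Int × PySem.Set (Int × Int)} {p : Int × Int}
    (hin : pvInB grid.length p) (hInv : pvOutInv grid done st) :
    pvOutInv grid (done ++ [p]) (pvStep grid (grid.length : Int) st p) := by
  obtain ⟨W1, W3, W4, seeds, hlen, hpw, hViff, hmiff⟩ := hInv
  by_cases hg : pvCell grid p.1 p.2 ≠ "A" ∧ ¬ PySem.Set.contains st.2.2 p
  · have hstep : pvStep grid (grid.length : Int) st p =
        (let v := PySem.Set.add st.2.2 p
         let mv := pvBfs grid (grid.length : Int) st.2.1
           (grid.length * grid.length + 1) [p] st.1 v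
         (mv.1, st.2.1 + 1, mv.2)) := by
      unfold pvStep
      rw [if_pos hg]
    rw [hstep]
    have hpnotV : p ∉ st.2.2 := fun h => hg.2 ((PySem.Set.contains_iff _ _).mpr h)
    have hpnonA : pvNonA grid p := ⟨hin, hg.1⟩
    have hVadd : PySem.Set.add st.2.2 p = st.2.2 ++ [p] := PySem.Set.add_of_not_mem hpnotV
    have hVaddnd : (st.2.2 ++ [p]).Nodup := by
      apply List.Nodup.append W1 (List.nodup_singleton _)
      intro x hx hx'
      simp only [List.mem_singleton] at hx'
      subst hx'
      exact hpnotV hx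
    have hprev : ∀ x, x ∈ st.2.2 → ¬ pvConn grid p x := by
      intro x hx hconn
      exact hpnotV (pvClosed_conn W3 hx (pvConn_symm hconn))
    have hbfs := pvBfs_spec grid st.2.1 p (fun x => x ∈ st.2.2) hprev
      (grid.length * grid.length + 1) [p] st.1 (st.2.2 ++ [p]) (fun _ => False)
      (List.nodup_singleton _)
      (by intro x hx
          simp only [List.mem_singleton] at hx
          rw [hx]
          exact ⟨hpnonA, Relation.ReflTransGen.refl⟩)
      hVaddnd
      (by intro x
          rw [List.mem_append, List.mem_singleton]
          tauto)
      (fun x hx => hx.elim)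
      (fun x hx => hx.elim)
      (Or.inl (List.mem_singleton.mpr rfl))
      (by
        have hsub : pvRem grid.length (st.2.2 ++ [p]) ⊆ (pvCells grid.length).erase p := by
          intro x hx
          rw [pv_mem_rem] at hx
          rw [Finset.mem_erase]
          refine ⟨?_, pv_mem_cells.mpr hx.1⟩
          rintro rfl
          exact hx.2 (by simp)
        have hcard := Finset.card_le_card hsub
        have hpmem : p ∈ pvCells grid.length := pv_mem_cells.mpr hin
        have herase := Finset.card_erase_of_mem hpmem
        have hcells := pv_card_cells grid.length
        have hpos : 1 ≤ (pvCells grid.length).card := Finset.card_pos.mpr ⟨p, hpmem⟩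
        simp only [List.length_cons, List.length_nil]
        omega)
    rw [hVadd]
    obtain ⟨p1a, p1b, p2, p3⟩ := hbfs
    refine ⟨p3, ?_, ?_, seeds ++ [p], ?_, ?_, ?_, ?_⟩
    · -- closure
      intro x hx y hy
      rcases (p2 x).mp hx with hx' | hx'
      · rcases List.mem_append.mp hx' with hx'' | hx''
        · exact (p2 y).mpr (Or.inl (List.mem_append.mpr (Or.inl (W3 x hx'' y hy))))
        · simp only [List.mem_singleton] at hx''
          rw [hx''] at hy
          exact (p2 y).mpr (Or.inr (Relation.ReflTransGen.single hy))
      · exact (p2 y).mpr (Or.inr (Relation.ReflTransGen.tail hx' hy))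
    · -- coverage
      intro x hx hna
      rcases List.mem_append.mp hx with hx' | hx'
      · exact (p2 x).mpr (Or.inl (List.mem_append.mpr (Or.inl (W4 x hx' hna))))
      · simp only [List.mem_singleton] at hx'
        rw [hx']
        exact (p2 p).mpr (Or.inr Relation.ReflTransGen.refl)
    · -- id counter
      simp only [List.length_append, List.length_singleton]
      push_cast
      omega
    · -- pairwise
      rw [List.pairwise_append]
      refine ⟨hpw, by simp, ?_⟩
      intro a ha b hb
      simp only [List.mem_singleton] at hb
      intro hconn
      rw [hb] at hconn
      exact hpnotV ((hViff p).mpr ⟨a, ha, hconn⟩)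
    · -- visited characterisation
      intro x
      rw [p2 x]
      constructor
      · rintro (hx | hx)
        · rcases List.mem_append.mp hx with hx' | hx'
          · obtain ⟨t, ht, hc⟩ := (hViff x).mp hx'
            exact ⟨t, List.mem_append.mpr (Or.inl ht), hc⟩
          · simp only [List.mem_singleton] at hx'
            rw [hx']
            exact ⟨p, List.mem_append.mpr (Or.inr (by simp)), Relation.ReflTransGen.refl⟩
        · exact ⟨p, List.mem_append.mpr (Or.inr (by simp)), hx⟩
      · rintro ⟨t, ht, hc⟩
        rcases List.mem_append.mp ht with ht' | ht'
        · exact Or.inl (List.mem_append.mpr (Or.inl ((hViff x).mpr ⟨t, ht', hc⟩)))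
        · simp only [List.mem_singleton] at ht'
          rw [ht'] at hc
          exact Or.inr hc
    · -- map characterisation
      intro x k
      by_cases hc : pvConn grid p x
      · rw [p1a x hc (by simp)]
        constructor
        · rintro h
          simp only [Option.some.injEq] at h
          refine ⟨seeds.length, (by simp only [List.length_append, List.length_cons, List.length_nil]; omega), (by omega), ?_⟩
          rw [List.getElem_concat_length]
          · exact hc
          · rfl
        · rintro ⟨i, hi, hk, hci⟩
          simp only [List.length_append, List.length_singleton] at hi
          by_cases hilen : i < seeds.length
          · exfalso
            rw [List.getElem_append_left hilen] at hci
            exact hpnotV ((hViff p).mpr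
              ⟨seeds[i], List.mem_of_getElem rfl, Relation.ReflTransGen.trans hci
                (pvConn_symm hc)⟩)
          · have : i = seeds.length := by omega
            subst this
            simp only [Option.some.injEq]
            omega
      · rw [p1b x (Or.inl hc)]
        rw [hmiff x k]
        constructor
        · rintro ⟨i, hi, hk, hci⟩
          refine ⟨i, (by simp only [List.length_append, List.length_cons, List.length_nil]; omega), hk, ?_⟩
          rw [List.getElem_append_left hi]
          exact hci
        · rintro ⟨i, hi, hk, hci⟩
          simp only [List.length_append, List.length_singleton] at hi
          by_cases hilen : i < seeds.length
          · rw [List.getElem_append_left hilen] at hci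
            exact ⟨i, hilen, hk, hci⟩
          · exfalso
            have : i = seeds.length := by omega
            subst this
            rw [List.getElem_concat_length] at hci
            · exact hc hci
            · rfl
  · have hstep : pvStep grid (grid.length : Int) st p = st := by
      unfold pvStep
      rw [if_neg hg]
    rw [hstep]
    refine ⟨W1, W3, ?_, seeds, hlen, hpw, hViff, hmiff⟩
    intro x hx hna
    rcases List.mem_append.mp hx with hx' | hx'
    · exact W4 x hx' hna
    · simp only [List.mem_singleton] at hx'
      subst hx'
      rcases Decidable.not_and_iff_or_not.mp hg with h | h
      · exact absurd hna.2 (by simpa using h)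
      · exact (PySem.Set.contains_iff _ _).mp (by simpa using h)

theorem pv_foldl_nested {α β γ : Type} (l1 : List α) (l2 : List β)
    (g : γ → α × β → γ) :
    ∀ st : γ, l1.foldl (fun st i => l2.foldl (fun st j => g st (i, j)) st) st =
      (l1.flatMap (fun i => l2.map (fun j => (i, j)))).foldl g st := by
  induction l1 with
  | nil => intro st; simp
  | cons x t ih =>
    intro st
    simp only [List.foldl_cons, List.flatMap_cons, List.foldl_append, List.foldl_map]
    exact ih _

def pvPairs (grid : List (List String)) : List (Int × Int) :=
  (PySem.List.pyRange 0 (grid.length : Int) 1).flatMap (fun i =>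
    (PySem.List.pyRange 0 (grid.length : Int) 1).map (fun j => (i, j)))

theorem pv_mem_pairs {grid : List (List String)} {x : Int × Int} :
    x ∈ pvPairs grid ↔ pvInB grid.length x := by
  unfold pvPairs pvInB
  simp only [List.mem_flatMap, List.mem_map, PySem.List.mem_pyRange_one]
  constructor
  · rintro ⟨i, hi, j, hj, rfl⟩
    exact ⟨hi.1, hi.2, hj.1, hj.2⟩
  · rintro ⟨h1, h2, h3, h4⟩
    exact ⟨x.1, ⟨h1, h2⟩, x.2, ⟨h3, h4⟩, rfl⟩

theorem pvOut_fold {grid : List (List String)} :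
    ∀ (l : List (Int × Int)), (∀ x ∈ l, pvInB grid.length x) →
    ∀ st done, pvOutInv grid done st →
      pvOutInv grid (done ++ l) (l.foldl (pvStep grid (grid.length : Int)) st) := by
  intro l
  induction l with
  | nil => intro _ st done h; simpa using h
  | cons x t ih =>
    intro hl st done h
    have h1 := pvStep_inv (hl x (by simp)) h
    have h2 := ih (fun y hy => hl y (by simp [hy])) _ _ h1
    simpa using h2

theorem pvPhase1_spec {grid : List (List String)} {p q : Int × Int}
    (hp : pvNonA grid p) (hq : pvNonA grid q) :
    (pvPhase1 grid).get? p = (pvPhase1 grid).get? q ↔ pvConn grid p q := by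
  have hinit : pvOutInv grid []
      ((PySem.Dict.empty : PySem.Dict (Int × Int) Int), (0 : Int),
       (PySem.Set.empty : PySem.Set (Int × Int))) := by
    refine ⟨by simp [PySem.Set.empty], by simp [PySem.Set.empty], by simp, [], by simp, by simp,
      by simp [PySem.Set.empty], ?_⟩
    intro x k
    simp [PySem.Dict.get?_empty]
  have hfold := pvOut_fold (pvPairs grid) (fun x hx => pv_mem_pairs.mp hx) _ _ hinit
  have hphase : pvPhase1 grid =
      ((pvPairs grid).foldl (pvStep grid (grid.length : Int))
        ((PySem.Dict.empty : PySem.Dict (Int × Int) Int), (0 : Int),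
         (PySem.Set.empty : PySem.Set (Int × Int)))).1 := by
    rw [show pvPhase1 grid =
      ((PySem.List.pyRange 0 (grid.length : Int) 1).foldl (fun st i =>
        (PySem.List.pyRange 0 (grid.length : Int) 1).foldl (fun st j =>
          pvStep grid (grid.length : Int) st (i, j)) st)
        ((PySem.Dict.empty : PySem.Dict (Int × Int) Int), (0 : Int),
         (PySem.Set.empty : PySem.Set (Int × Int)))).1 from rfl]
    rw [pv_foldl_nested]
    rfl
  obtain ⟨_, _, W4, seeds, _, hpw, hViff, hmiff⟩ := hfold
  rw [hphase]
  have hcov : ∀ x : Int × Int, pvNonA grid x →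
      ∃ i : Nat, ∃ h : i < seeds.length, pvConn grid seeds[i] x := by
    intro x hna
    have hxV := W4 x (by simp [pv_mem_pairs, hna.1]) hna
    obtain ⟨t, ht, hc⟩ := (hViff x).mp hxV
    obtain ⟨i, hi, rfl⟩ := List.getElem_of_mem ht
    exact ⟨i, hi, hc⟩
  obtain ⟨ip, hip, hcp⟩ := hcov p hp
  obtain ⟨iq, hiq, hcq⟩ := hcov q hq
  have hgp := (hmiff p ((ip : Nat) : Int)).mpr ⟨ip, hip, rfl, hcp⟩
  have hgq := (hmiff q ((iq : Nat) : Int)).mpr ⟨iq, hiq, rfl, hcq⟩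
  rw [hgp, hgq]
  constructor
  · intro h
    have hik : ip = iq := by
      simp only [Option.some.injEq] at h
      omega
    subst hik
    exact Relation.ReflTransGen.trans (pvConn_symm hcp) hcq
  · intro hconn
    have hcss : pvConn grid seeds[ip] seeds[iq] :=
      Relation.ReflTransGen.trans hcp
        (Relation.ReflTransGen.trans hconn (pvConn_symm hcq))
    have hik : ip = iq := by
      by_contra hne
      rcases Nat.lt_or_ge ip iq with hlt | hge
      · exact (List.pairwise_iff_getElem.mp hpw ip iq hip hiq hlt) hcss
      · have hlt : iq < ip := by omega
        exact (List.pairwise_iff_getElem.mp hpw iq ip hiq hip hlt) (pvConn_symm hcss)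
    subst hik
    rfl

-- ============ assembling the final scan ============

theorem pv_all_congr {α : Type} {l : List α} {f g : α → Bool}
    (h : ∀ x ∈ l, f x = g x) : l.all f = l.all g := by
  induction l with
  | nil => rfl
  | cons x t ih =>
    simp only [List.all_cons]
    rw [h x (by simp), ih (fun y hy => h y (by simp [hy]))]

theorem pv_isEmpty_flatMap {α β : Type} (l : List α) (f : α → List β) :
    (l.flatMap f).isEmpty = l.all (fun x => (f x).isEmpty) := by
  induction l with
  | nil => rfl
  | cons x t ih =>
    simp only [List.flatMap_cons, List.all_cons, ← ih]
    rcases f x with _ | ⟨y, ys⟩ <;> simp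

theorem pv_isEmpty_filter_map {α β : Type} (l : List α) (p : α → Bool) (g : α → β) :
    ((l.filter p).map g).isEmpty = l.all (fun x => !p x) := by
  induction l with
  | nil => rfl
  | cons x t ih =>
    by_cases h : p x <;> simp [h, ih]

-- pointwise agreement of the two diagonal tests inside the scan range
theorem pv_term_eq (grid : List (List String)) {i j : Int}
    (hi1 : 0 ≤ i) (hi2 : i < (grid.length : Int) - 1)
    (hj1 : 0 ≤ j) (hj2 : j < (grid.length : Int) - 1) :
    ((if pvCell grid i j ≠ "A" ∧ pvCell grid (i+1) (j+1) ≠ "A" ∧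
          pvCell grid i (j+1) = "A" ∧ pvCell grid (i+1) j = "A" then
        decide ((pvPhase1 grid).get? (i, j) = (pvPhase1 grid).get? (i+1, j+1))
      else true) &&
      (if pvCell grid i (j+1) ≠ "A" ∧ pvCell grid (i+1) j ≠ "A" ∧
          pvCell grid i j = "A" ∧ pvCell grid (i+1) (j+1) = "A" then
        decide ((pvPhase1 grid).get? (i, j+1) = (pvPhase1 grid).get? (i+1, j))
      else true)) = !pvViol (pvLabels grid) i j := by
  have h00 : pvInB grid.length (i, j) := ⟨hi1, by omega, hj1, by omega⟩
  have h01 : pvInB grid.length (i, j+1) := ⟨hi1, by omega, by omega, by omega⟩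
  have h10 : pvInB grid.length (i+1, j) := ⟨by omega, by omega, hj1, by omega⟩
  have h11 : pvInB grid.length (i+1, j+1) := ⟨by omega, by omega, by omega, by omega⟩
  unfold pvViol
  rw [pvLab_bne grid h00, pvLab_bne grid h01, pvLab_bne grid h10, pvLab_bne grid h11,
    pvLab_beq grid h00, pvLab_beq grid h01, pvLab_beq grid h10, pvLab_beq grid h11]
  rw [Bool.not_or]
  congr 1
  · by_cases hC : pvCell grid i j ≠ "A" ∧ pvCell grid (i+1) (j+1) ≠ "A" ∧
        pvCell grid i (j+1) = "A" ∧ pvCell grid (i+1) j = "A"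
    · rw [if_pos hC]
      obtain ⟨c1, c2, c3, c4⟩ := hC
      have hp : pvNonA grid (i, j) := ⟨h00, c1⟩
      have hq : pvNonA grid (i+1, j+1) := ⟨h11, c2⟩
      have heq : (pvPhase1 grid).get? (i, j) = (pvPhase1 grid).get? (i+1, j+1) ↔
          pvLabAt (pvLabels grid) i j = pvLabAt (pvLabels grid) (i+1) (j+1) := by
        rw [pvPhase1_spec hp hq]
        exact (pvLabels_spec hp hq).symm
      by_cases hd : pvLabAt (pvLabels grid) i j = pvLabAt (pvLabels grid) (i+1) (j+1) <;>
        simp [c1, c2, c3, c4, hd, heq]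
    · rw [if_neg hC]
      rcases Decidable.not_and_iff_or_not.mp hC with h | hC2
    

      · simp [not_not.mp (by simpa using h)]
      · rcases Decidable.not_and_iff_or_not.mp hC2 with h | hC3
        · simp [not_not.mp (by simpa using h)]
        · rcases Decidable.not_and_iff_or_not.mp hC3 with h | h
          · simp [h]
          · simp [h]
  · by_cases hC : pvCell grid i (j+1) ≠ "A" ∧ pvCell grid (i+1) j ≠ "A" ∧
        pvCell grid i j = "A" ∧ pvCell grid (i+1) (j+1) = "A"
    · rw [if_pos hC]
      obtain ⟨c1, c2, c3, c4⟩ := hC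
      have hp : pvNonA grid (i, j+1) := ⟨h01, c1⟩
      have hq : pvNonA grid (i+1, j) := ⟨h10, c2⟩
      have heq : (pvPhase1 grid).get? (i, j+1) = (pvPhase1 grid).get? (i+1, j) ↔
          pvLabAt (pvLabels grid) i (j+1) = pvLabAt (pvLabels grid) (i+1) j := by
        rw [pvPhase1_spec hp hq]
        exact (pvLabels_spec hp hq).symm
      by_cases hd : pvLabAt (pvLabels grid) i (j+1) = pvLabAt (pvLabels grid) (i+1) j <;>
        simp [c1, c2, c3, c4, hd, heq]
    · rw [if_neg hC]
      rcases Decidable.not_and_iff_or_not.mp hC with h | hC2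
      · simp [not_not.mp (by simpa using h)]
      · rcases Decidable.not_and_iff_or_not.mp hC2 with h | hC3
        · simp [not_not.mp (by simpa using h)]
        · rcases Decidable.not_and_iff_or_not.mp hC3 with h | h
          · simp [h]
          · simp [h]

-- ===== VERDICT (by name: the statement is the Claim_ definition above) =====
theorem check_diagonal_borders_py_spec : Claim_equal_check_diagonal_borders_py := by
  intro grid _ _
  show check_diagonal_borders_py grid = check_diagonal_borders_py_alt grid
  unfold check_diagonal_borders_py check_diagonal_borders_py_alt
  rw [pv_isEmpty_flatMap]
  apply pv_all_congr
  intro i hi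
  rw [PySem.List.mem_pyRange_one] at hi
  rw [pv_isEmpty_filter_map]
  apply pv_all_congr
  intro j hj
  rw [PySem.List.mem_pyRange_one] at hj
  exact pv_term_eq grid hi.1 hi.2 hj.1 hj.2
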